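-- pv_equiv track=rewrite | github.com/pgradyg/wave-function-collapse-py | main.py | get_constraints
-- ===== SOURCE A (Python) =====
-- pattern = [
--     ["trees", "trees", "grass"],
--     ["grass", "grass", "shore"],
--     ["grass", "shore", "water"],
--     ["shore", "shore", "water"],
--     ["water", "water", "ocean"],
--     ["ocean", "ocean", "ocean"]
-- ]
--
-- def get_constraints(pattern):
--     constraints = {}
--     for row in range(len(pattern)):
--         for col in range(len(pattern[0])):
--             tile = pattern[row][col]
--             if tile not in constraints:
--                 constraints[tile] = set()
--             if row > 0:
--                 constraints[tile].add(pattern[row - 1][col])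
--             if row < len(pattern) - 1:
--                 constraints[tile].add(pattern[row + 1][col])
--             if col > 0:
--                 constraints[tile].add(pattern[row][col - 1])
--             if col < len(pattern[0]) - 1:
--                 constraints[tile].add(pattern[row][col + 1])
--     return constraints
--
-- constraints = get_constraints(pattern)
-- ===== SOURCE B (Python) =====
-- def get_constraints(pattern):
--     if not pattern:
--         return {}
--     h, w = len(pattern), len(pattern[0])
--
--     def neighbors(r, c):
--         out = []
--         if r > 0:
--             out.append(pattern[r - 1][c])
--         if r < h - 1:
--             out.append(pattern[r + 1][c])
--         if c > 0:
--             out.append(pattern[r][c - 1])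
--         if c < w - 1:
--             out.append(pattern[r][c + 1])
--         return out
--
--     positions = {}
--     for r in range(h):
--         for c in range(w):
--             positions.setdefault(pattern[r][c], []).append((r, c))
--
--     return {t: set(n for rc in cells for n in neighbors(*rc))
--             for t, cells in positions.items()}
-- ===== Notes on version B (the rewrite author's own statement) =====
-- stated objective: alternative
-- what changed: A builds neighbour sets cell-by-cell with in-place dict/set mutation and four inline boundary checks per cell; B first groups cell coordinates by tile in one pass (positions dict), then builds each tile's constraint set in a comprehension from the neighbours of its recorded occurrences.
import Mathlib
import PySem

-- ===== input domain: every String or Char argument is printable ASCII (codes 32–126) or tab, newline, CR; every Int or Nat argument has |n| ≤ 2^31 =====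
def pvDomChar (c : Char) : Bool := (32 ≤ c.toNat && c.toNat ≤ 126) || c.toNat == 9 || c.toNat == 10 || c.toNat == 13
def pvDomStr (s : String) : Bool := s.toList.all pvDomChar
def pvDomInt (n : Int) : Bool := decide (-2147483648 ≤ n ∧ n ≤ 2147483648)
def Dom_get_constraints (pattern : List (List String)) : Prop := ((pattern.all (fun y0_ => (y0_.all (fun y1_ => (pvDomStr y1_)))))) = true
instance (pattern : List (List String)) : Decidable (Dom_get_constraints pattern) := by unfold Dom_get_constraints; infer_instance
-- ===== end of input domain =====

-- B replaces A's per-cell mutate-in-place pass by a group-by-tile pass followed by a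
-- per-tile set comprehension over the recorded occurrences (objective: alternative decomposition).

-- ===== PORT A =====
def get_constraints (pattern : List (List String)) : List (String × List String) :=
  let d : PySem.Dict String (PySem.Set String) :=
    (PySem.List.pyRange 0 (pattern.length : Int) 1).foldl (fun d row =>
      (PySem.List.pyRange 0 ((PySem.List.pyGetD pattern 0 []).length : Int) 1).foldl (fun d col =>
        let tile := PySem.List.pyGetD (PySem.List.pyGetD pattern row []) col ""
        let d := if d.contains tile then d else d.insert tile PySem.Set.empty
        let d := if row > 0 then
            d.modify tile PySem.Set.empty (fun s => PySem.Set.add s (PySem.List.pyGetD (PySem.List.pyGetD pattern (row - 1) []) col "")) else d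
        let d := if row < (pattern.length : Int) - 1 then
            d.modify tile PySem.Set.empty (fun s => PySem.Set.add s (PySem.List.pyGetD (PySem.List.pyGetD pattern (row + 1) []) col "")) else d
        let d := if col > 0 then
            d.modify tile PySem.Set.empty (fun s => PySem.Set.add s (PySem.List.pyGetD (PySem.List.pyGetD pattern row []) (col - 1) "")) else d
        let d := if col < ((PySem.List.pyGetD pattern 0 []).length : Int) - 1 then
            d.modify tile PySem.Set.empty (fun s => PySem.Set.add s (PySem.List.pyGetD (PySem.List.pyGetD pattern row []) (col + 1) "")) else d
        d) d) PySem.Dict.empty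
  d.items

-- ===== PORT B =====
-- Source B's local helper `neighbors(r, c)`: a list built by four conditional appends
def pvNeighbors (pattern : List (List String)) (h w r c : Int) : List String :=
  let out : List String := []
  let out := if r > 0 then out ++ [PySem.List.pyGetD (PySem.List.pyGetD pattern (r - 1) []) c ""] else out
  let out := if r < h - 1 then out ++ [PySem.List.pyGetD (PySem.List.pyGetD pattern (r + 1) []) c ""] else out
  let out := if c > 0 then out ++ [PySem.List.pyGetD (PySem.List.pyGetD pattern r []) (c - 1) ""] else out
  let out := if c < w - 1 then out ++ [PySem.List.pyGetD (PySem.List.pyGetD pattern r []) (c + 1) ""] else out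
  out

def get_constraints_alt (pattern : List (List String)) : List (String × List String) :=
  if pattern = [] then []
  else
    let h : Int := (pattern.length : Int)
    let w : Int := ((PySem.List.pyGetD pattern 0 []).length : Int)
    -- positions.setdefault(pattern[r][c], []).append((r, c))  =  modify with default []
    let positions : PySem.Dict String (List (Int × Int)) :=
      (PySem.List.pyRange 0 h 1).foldl (fun p r =>
        (PySem.List.pyRange 0 w 1).foldl (fun p c =>
          p.modify (PySem.List.pyGetD (PySem.List.pyGetD pattern r []) c "") [] (fun l => l ++ [(r, c)])) p) PySem.Dict.empty
    positions.items.map (fun tc =>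
      (tc.1, PySem.Set.ofList (tc.2.flatMap (fun rc => pvNeighbors pattern h w rc.1 rc.2))))

-- ===== PRECONDITION & SPEC =====
-- Pre_ excludes only the ragged patterns with a row shorter than the first row, exactly the
-- inputs on which Python A raises IndexError (B raises there too).
def Pre_get_constraints (pattern : List (List String)) : Prop :=
  ∀ row ∈ pattern, (pattern.headI).length ≤ row.length
instance (pattern : List (List String)) : Decidable (Pre_get_constraints pattern) := by unfold Pre_get_constraints; infer_instance

def pvWitness_get_constraints : List (List String) := [["a", "b"], ["c", "a"]]

def Spec_get_constraints (pattern : List (List String)) (out : List (String × List String)) : Prop := out = get_constraints_alt pattern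
instance (pattern : List (List String)) (out : List (String × List String)) : Decidable (Spec_get_constraints pattern out) := by unfold Spec_get_constraints; infer_instance

-- ===== CLAIM (what is proved, stated in full; the proofs are below) =====
def Claim_equal_get_constraints : Prop := ∀ (pattern : List (List String)), Dom_get_constraints pattern → Pre_get_constraints pattern → Spec_get_constraints pattern (get_constraints pattern)

-- ===== LEMMAS AND PROOFS =====

-- the tile at a cell
def pvKey (pattern : List (List String)) (rc : Int × Int) : String :=
  PySem.List.pyGetD (PySem.List.pyGetD pattern rc.1 []) rc.2 ""

-- A's per-cell step, exactly the body of A's inner loop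
def pvStepA (pattern : List (List String)) (h w : Int) (d : PySem.Dict String (PySem.Set String)) (rc : Int × Int) : PySem.Dict String (PySem.Set String) :=
  let tile := pvKey pattern rc
  let d := if d.contains tile then d else d.insert tile PySem.Set.empty
  let d := if rc.1 > 0 then
      d.modify tile PySem.Set.empty (fun s => PySem.Set.add s (PySem.List.pyGetD (PySem.List.pyGetD pattern (rc.1 - 1) []) rc.2 "")) else d
  let d := if rc.1 < h - 1 then
      d.modify tile PySem.Set.empty (fun s => PySem.Set.add s (PySem.List.pyGetD (PySem.List.pyGetD pattern (rc.1 + 1) []) rc.2 "")) else d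
  let d := if rc.2 > 0 then
      d.modify tile PySem.Set.empty (fun s => PySem.Set.add s (PySem.List.pyGetD (PySem.List.pyGetD pattern rc.1 []) (rc.2 - 1) "")) else d
  let d := if rc.2 < w - 1 then
      d.modify tile PySem.Set.empty (fun s => PySem.Set.add s (PySem.List.pyGetD (PySem.List.pyGetD pattern rc.1 []) (rc.2 + 1) "")) else d
  d

-- A's per-cell step, normalised: one modify with the whole neighbour list
def pvStepN (pattern : List (List String)) (h w : Int) (d : PySem.Dict String (PySem.Set String)) (rc : Int × Int) : PySem.Dict String (PySem.Set String) :=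
  d.modify (pvKey pattern rc) PySem.Set.empty (fun s => PySem.Set.update s (pvNeighbors pattern h w rc.1 rc.2))

-- B's per-cell step (recording the occurrence)
def pvStepP (pattern : List (List String)) (p : PySem.Dict String (List (Int × Int))) (rc : Int × Int) : PySem.Dict String (List (Int × Int)) :=
  p.modify (pvKey pattern rc) [] (fun l => l ++ [rc])

-- the row-major list of cell coordinates
def pvCells (h w : Int) : List (Int × Int) :=
  (PySem.List.pyRange 0 h 1).flatMap (fun r => (PySem.List.pyRange 0 w 1).map (fun c => (r, c)))

-- the image of a positions dict under "occurrences ↦ set of their neighbours"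
def pvImg (nb : Int × Int → List String) (p : PySem.Dict String (List (Int × Int))) : PySem.Dict String (PySem.Set String) :=
  PySem.Dict.mk (p.items.map (fun tc => (tc.1, PySem.Set.ofList (tc.2.flatMap nb))))

theorem pv_modify_modify {κ ν : Type} [BEq κ] [LawfulBEq κ] (d : PySem.Dict κ ν) (k : κ) (a : ν) (f g : ν → ν) :
    (d.modify k a f).modify k a g = d.modify k a (fun x => g (f x)) := by
  simp [PySem.Dict.modify, PySem.Dict.getD_insert_self, PySem.Dict.insert_insert_self]

theorem pv_ensure_modify {κ ν : Type} [BEq κ] [LawfulBEq κ] (d : PySem.Dict κ ν) (k : κ) (e : ν) (f : ν → ν) :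
    (if d.contains k then d else d.insert k e).modify k e f = d.modify k e f := by
  by_cases hc : d.contains k = true
  · simp [hc]
  · rw [if_neg (by simp [hc])]
    simp [PySem.Dict.modify, PySem.Dict.getD_insert_self, PySem.Dict.insert_insert_self,
      PySem.Dict.getD_of_not_contains d e (Bool.not_eq_true _ ▸ hc)]

theorem pv_aux_map_find {κ ν : Type} [BEq κ] [LawfulBEq κ] (k : κ) :
    ∀ (l : List (κ × ν)) (pv : κ × ν), (l.map Prod.fst).Nodup →
      l.find? (fun p => p.1 == k) = some pv →
      l.map (fun p => if p.1 == k then (k, pv.2) else p) = l := by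
  intro l
  induction l with
  | nil => intro pv _ h; simp at h
  | cons a t ih =>
    intro pv hnd hf
    rw [List.map_cons, List.nodup_cons] at hnd
    obtain ⟨hh, ht⟩ := hnd
    by_cases ha : (a.1 == k) = true
    · rw [List.find?_cons_of_pos (p := fun p => p.1 == k) (l := t) ha] at hf
      cases hf
      have hk : a.1 = k := by simpa using ha
      have hid : ∀ p ∈ t, (if (p.1 == k) = true then (k, a.2) else p) = p := by
        intro p hp
        have hne : ¬ (p.1 == k) = true := by
          simp only [beq_iff_eq]
          intro h
          apply hh
          rw [hk, ← h]
          exact List.mem_map.mpr ⟨p, hp, rfl⟩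
        simp [hne]
      simp only [List.map_cons, ha, if_pos]
      rw [List.map_congr_left hid]
      simp [← hk]
    · rw [List.find?_cons_of_neg (p := fun p => p.1 == k) (l := t) ha] at hf
      simp only [List.map_cons, ha]
      rw [ih pv ht hf]
      simp

theorem pv_insert_getD_self {κ ν : Type} [BEq κ] [LawfulBEq κ] (d : PySem.Dict κ ν) (k : κ) (v0 : ν)
    (hc : d.contains k = true) (hnd : d.keys.Nodup) : d.insert k (d.getD k v0) = d := by
  cases hfind : d.items.find? (fun p => p.1 == k) with
  | none =>
    exfalso
    have := List.find?_eq_none.mp hfind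
    simp only [PySem.Dict.contains, List.any_eq_true] at hc
    obtain ⟨p, hp, hpk⟩ := hc
    exact absurd hpk (by simpa using this p hp)
  | some pv =>
    have hg : d.getD k v0 = pv.2 := by
      simp [PySem.Dict.getD, PySem.Dict.get?, hfind]
    apply PySem.Dict.ext
    rw [PySem.Dict.items_insert_of_contains _ _ hc, hg]
    exact pv_aux_map_find k d.items pv hnd hfind

theorem pv_modify_nodup {κ ν : Type} [BEq κ] [LawfulBEq κ] (d : PySem.Dict κ ν) (k : κ) (e : ν) (f : ν → ν)
    (hnd : d.keys.Nodup) : (d.modify k e f).keys.Nodup :=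
  PySem.Dict.nodup_keys_insert d k _ hnd

-- A's cell body collapses to the single-modify normal form
theorem pv_stepA_eq (pattern : List (List String)) (h w : Int) (d : PySem.Dict String (PySem.Set String))
    (rc : Int × Int) (hnd : d.keys.Nodup) : pvStepA pattern h w d rc = pvStepN pattern h w d rc := by
  unfold pvStepA pvStepN pvNeighbors
  dsimp only
  set k := pvKey pattern rc with hk
  set d1 := if d.contains k = true then d else d.insert k PySem.Set.empty with hd1
  split_ifs <;> (try simp only [pv_modify_modify]) <;>
    first
      | (rw [hd1, pv_ensure_modify]; simp only [PySem.Dict.modify, PySem.Set.update]; simp)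
      | (-- all four conditions false: the ensure step alone
         rw [hd1]
         by_cases hc : d.contains k = true
         · rw [if_pos hc]
           simp only [PySem.Dict.modify, PySem.Set.update, List.foldl_nil]
           exact (pv_insert_getD_self d k _ hc hnd).symm
         · rw [if_neg (by simp [hc])]
           simp [PySem.Dict.modify, PySem.Set.update,
             PySem.Dict.getD_of_not_contains d _ (Bool.not_eq_true _ ▸ hc)])

-- nested loop over rows and columns = one loop over the row-major cell list
theorem pv_nested {γ : Type} (rs cs : List Int) (F : γ → Int × Int → γ) (init : γ) :
    rs.foldl (fun d r => cs.foldl (fun d c => F d (r, c)) d) init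
      = (rs.flatMap (fun r => cs.map (fun c => (r, c)))).foldl F init := by
  induction rs generalizing init with
  | nil => rfl
  | cons r rs ih => simp [List.foldl_append, List.foldl_map, ih]

theorem pv_img_contains (nb : Int × Int → List String) (p : PySem.Dict String (List (Int × Int))) (k : String) :
    (pvImg nb p).contains k = p.contains k := by
  simp only [pvImg, PySem.Dict.contains, List.any_map]
  rfl

theorem pv_img_get? (nb : Int × Int → List String) (p : PySem.Dict String (List (Int × Int))) (k : String) :
    (pvImg nb p).get? k = (p.get? k).map (fun occ => PySem.Set.ofList (occ.flatMap nb)) := by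
  simp only [pvImg, PySem.Dict.get?, List.find?_map, Option.map_map]
  rfl

theorem pv_img_insert (nb : Int × Int → List String) (p : PySem.Dict String (List (Int × Int))) (k : String) (occ : List (Int × Int)) :
    pvImg nb (p.insert k occ) = (pvImg nb p).insert k (PySem.Set.ofList (occ.flatMap nb)) := by
  unfold PySem.Dict.insert
  rw [pv_img_contains]
  by_cases hc : p.contains k = true
  · simp only [hc, if_pos]
    unfold pvImg
    simp only [List.map_map]
    congr 1
    apply List.map_congr_left
    intro q hq
    by_cases hk : (q.1 == k) = true
    · simp [Function.comp, hk]
    · simp [Function.comp, hk]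
  · simp only [hc, if_neg, Bool.false_eq_true, not_false_iff]
    unfold pvImg
    simp

theorem pv_img_getD (nb : Int × Int → List String) (p : PySem.Dict String (List (Int × Int))) (k : String) :
    (pvImg nb p).getD k [] = PySem.Set.ofList ((p.getD k []).flatMap nb) := by
  rw [PySem.Dict.getD_eq_get?_getD, PySem.Dict.getD_eq_get?_getD, pv_img_get?]
  cases p.get? k <;> simp [PySem.Set.ofList_eq_foldl]

theorem pv_img_modify (nb : Int × Int → List String) (p : PySem.Dict String (List (Int × Int))) (k : String) (x : Int × Int) :
    pvImg nb (p.modify k [] (fun l => l ++ [x])) = (pvImg nb p).modify k [] (fun s => PySem.Set.update s (nb x)) := by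
  unfold PySem.Dict.modify
  rw [pv_img_insert, pv_img_getD]
  congr 1
  rw [List.flatMap_append, PySem.Set.ofList_eq_foldl, PySem.Set.ofList_eq_foldl, List.foldl_append]
  simp [PySem.Set.update]

-- the normalised A-loop is the image of B's positions loop
theorem pv_main (pattern : List (List String)) (h w : Int) :
    ∀ (cs : List (Int × Int)) (p : PySem.Dict String (List (Int × Int))),
    cs.foldl (pvStepN pattern h w) (pvImg (fun rc => pvNeighbors pattern h w rc.1 rc.2) p)
      = pvImg (fun rc => pvNeighbors pattern h w rc.1 rc.2) (cs.foldl (pvStepP pattern) p) := by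
  intro cs
  induction cs with
  | nil => intro p; rfl
  | cons x cs ih =>
    intro p
    simp only [List.foldl_cons]
    rw [show pvStepN pattern h w (pvImg (fun rc => pvNeighbors pattern h w rc.1 rc.2) p) x
          = pvImg (fun rc => pvNeighbors pattern h w rc.1 rc.2) (pvStepP pattern p x) from by
        unfold pvStepN pvStepP
        exact (pv_img_modify _ p (pvKey pattern x) x).symm]
    exact ih _

theorem pv_foldA_eq_foldN (pattern : List (List String)) (h w : Int) :
    ∀ (cs : List (Int × Int)) (d : PySem.Dict String (PySem.Set String)), d.keys.Nodup →
    cs.foldl (pvStepA pattern h w) d = cs.foldl (pvStepN pattern h w) d := by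
  intro cs
  induction cs with
  | nil => intro d _; rfl
  | cons x cs ih =>
    intro d hnd
    simp only [List.foldl_cons]
    rw [pv_stepA_eq pattern h w d x hnd]
    exact ih _ (pv_modify_nodup _ _ _ _ hnd)

theorem pv_A_norm (pattern : List (List String)) :
    get_constraints pattern
      = ((pvCells (pattern.length : Int) ((PySem.List.pyGetD pattern 0 []).length : Int)).foldl
          (pvStepA pattern (pattern.length : Int) ((PySem.List.pyGetD pattern 0 []).length : Int)) PySem.Dict.empty).items := by
  show (((PySem.List.pyRange 0 (pattern.length : Int) 1).foldl (fun d r =>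
      (PySem.List.pyRange 0 ((PySem.List.pyGetD pattern 0 []).length : Int) 1).foldl (fun d c =>
        pvStepA pattern (pattern.length : Int) ((PySem.List.pyGetD pattern 0 []).length : Int) d (r, c)) d)
      PySem.Dict.empty).items) = _
  rw [pv_nested]
  rfl

theorem pv_B_norm (pattern : List (List String)) (hne : pattern ≠ []) :
    get_constraints_alt pattern
      = (pvImg (fun rc => pvNeighbors pattern (pattern.length : Int) ((PySem.List.pyGetD pattern 0 []).length : Int) rc.1 rc.2)
          ((pvCells (pattern.length : Int) ((PySem.List.pyGetD pattern 0 []).length : Int)).foldl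
            (pvStepP pattern) PySem.Dict.empty)).items := by
  unfold get_constraints_alt
  rw [if_neg hne]
  show (((PySem.List.pyRange 0 (pattern.length : Int) 1).foldl (fun p r =>
      (PySem.List.pyRange 0 ((PySem.List.pyGetD pattern 0 []).length : Int) 1).foldl (fun p c =>
        pvStepP pattern p (r, c)) p) PySem.Dict.empty).items.map (fun tc =>
        (tc.1, PySem.Set.ofList (tc.2.flatMap (fun rc =>
          pvNeighbors pattern (pattern.length : Int) ((PySem.List.pyGetD pattern 0 []).length : Int) rc.1 rc.2))))) = _
  rw [pv_nested]
  rfl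

-- ===== VERDICT (by name: the statement is the Claim_ definition above) =====
theorem get_constraints_spec : Claim_equal_get_constraints := by
  intro pattern _ _
  unfold Spec_get_constraints
  by_cases hne : pattern = []
  · subst hne; rfl
  · rw [pv_A_norm, pv_B_norm pattern hne,
        pv_foldA_eq_foldN pattern _ _ _ PySem.Dict.empty (by simp),
        show (PySem.Dict.empty : PySem.Dict String (PySem.Set String))
              = pvImg (fun rc => pvNeighbors pattern (pattern.length : Int) ((PySem.List.pyGetD pattern 0 []).length : Int) rc.1 rc.2) PySem.Dict.empty from rfl,
        pv_main]
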